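-- pv_equiv track=rewrite | github.com/StableCrimson/AdventOfCode | 2025/Day 6 - Trash Compactor/part_2.py | digest_problem_top_down
-- ===== SOURCE A (Python) =====
-- from typing import List
--
-- def digest_problem_top_down(problem: List[str]) -> List[str]:
--   operator = problem[-1].strip()
--
--   new_digits = []
--
--   for number in problem[:-1]:
--     for i, c in enumerate(number):
--       if len(new_digits) > i:
--         new_digits[i] += c
--       else:
--         new_digits.append(c)
--
--   return [*[digit.strip() for digit in new_digits], operator]
-- ===== SOURCE B (Python) =====
-- from typing import List
--
-- def digest_problem_top_down(problem: List[str]) -> List[str]: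
--   operator = problem[-1].strip()
--   numbers = problem[:-1]
--   max_len = max((len(n) for n in numbers), default=0)
--   result = []
--   for i in range(max_len):
--     col = ''.join(line[i] for line in numbers if i < len(line))
--     result.append(col.strip())
--   result.append(operator)
--   return result
-- ===== Notes on version B (the rewrite author's own statement) =====
-- stated objective: faster
-- what changed: B builds each output column directly with one ''.join per column index (over range(max line length)) instead of A's incremental row-major accumulation that repeatedly extends each column string with '+=' per character.
import Mathlib
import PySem

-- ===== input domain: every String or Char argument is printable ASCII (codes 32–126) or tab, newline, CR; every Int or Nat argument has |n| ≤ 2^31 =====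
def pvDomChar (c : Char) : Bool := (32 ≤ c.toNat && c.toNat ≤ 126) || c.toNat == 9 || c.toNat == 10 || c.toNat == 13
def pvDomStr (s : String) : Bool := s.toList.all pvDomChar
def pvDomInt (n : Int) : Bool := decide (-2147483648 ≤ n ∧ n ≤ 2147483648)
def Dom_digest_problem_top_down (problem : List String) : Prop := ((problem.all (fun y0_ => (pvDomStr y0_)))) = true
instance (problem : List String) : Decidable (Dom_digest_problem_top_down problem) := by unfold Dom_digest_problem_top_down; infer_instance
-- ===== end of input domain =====

-- B replaces A's incremental row-major per-character accumulation by a direct column-by-column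
-- construction with one join per column (measured faster on the generated timing inputs).

-- ===== PORT A =====
-- inner loop: 'for i, c in enumerate(number): if len(new_digits) > i: new_digits[i] += c else: new_digits.append(c)'
-- (digits kept as List Char; the final strings are assembled at return, where A strips them)
def pvRowA (nd : List (List Char)) (i : Nat) : List Char → List (List Char)
  | [] => nd
  | c :: cs => pvRowA (if nd.length > i then nd.set i (nd.getD i [] ++ [c]) else nd ++ [[c]]) (i + 1) cs

def digest_problem_top_down (problem : List String) : List String :=
  let operator := PySem.Str.strip (PySem.List.pyGetD problem (-1) "")
  let new_digits := (PySem.List.slice problem none (some (-1))).foldl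
      (fun nd number => pvRowA nd 0 number.toList) ([] : List (List Char))
  new_digits.map (fun d => String.ofList (PySem.Chars.strip d)) ++ [operator]

-- ===== PORT B =====
def digest_problem_top_down_alt (problem : List String) : List String :=
  let operator := PySem.Str.strip (PySem.List.pyGetD problem (-1) "")
  let numbers := PySem.List.slice problem none (some (-1))
  let maxLen := (numbers.map (fun n => n.toList.length)).foldl max 0
  let cols := (List.range maxLen).map (fun i =>
      String.ofList (PySem.Chars.strip (numbers.filterMap (fun line => line.toList[i]?))))
  cols ++ [operator]

-- ===== PRECONDITION & SPEC =====
-- A evaluates problem[-1], which raises IndexError on the empty list; Pre_ excludes exactly that.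
def Pre_digest_problem_top_down (problem : List String) : Prop := problem ≠ []
instance (problem : List String) : Decidable (Pre_digest_problem_top_down problem) := by
  unfold Pre_digest_problem_top_down; infer_instance
def pvWitness_digest_problem_top_down : List String := ["12", "34", "+"]

def Spec_digest_problem_top_down (problem : List String) (out : List String) : Prop :=
  out = digest_problem_top_down_alt problem
instance (problem : List String) (out : List String) : Decidable (Spec_digest_problem_top_down problem out) := by
  unfold Spec_digest_problem_top_down; infer_instance

-- ===== CLAIM (what is proved, stated in full; the proofs are below) =====
def Claim_equal_digest_problem_top_down : Prop := ∀ (problem : List String),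
  Dom_digest_problem_top_down problem → Pre_digest_problem_top_down problem →
  Spec_digest_problem_top_down problem (digest_problem_top_down problem)

-- ===== LEMMAS AND PROOFS =====

/-- Merge of an existing column (at some index) with an optional new character. -/
def pvMerge : Option (List Char) → Option Char → Option (List Char)
  | some d, some c => some (d ++ [c])
  | some d, none => some d
  | none, some c => some [c]
  | none, none => none

theorem pvRowA_getElem? (cs : List Char) : ∀ (i : Nat) (nd : List (List Char)), i ≤ nd.length →
    ∀ j : Nat, (pvRowA nd i cs)[j]? = pvMerge nd[j]? (if i ≤ j then cs[j - i]? else none) := by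
  induction cs with
  | nil =>
    intro i nd _ j
    simp only [pvRowA]
    cases h : nd[j]? <;> cases Nat.decLe i j <;> simp_all [pvMerge]
  | cons c cs ih =>
    intro i nd hi j
    simp only [pvRowA]
    set nd' := if nd.length > i then nd.set i (nd.getD i [] ++ [c]) else nd ++ [[c]] with hnd'
    have hlen' : i + 1 ≤ nd'.length := by
      by_cases h : nd.length > i <;> simp [hnd', h, List.length_set, List.length_append] <;> omega
    have hget' : ∀ k : Nat, nd'[k]? = if k = i then pvMerge nd[i]? (some c) else nd[k]? := by
      intro k
      by_cases h : nd.length > i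
      · simp only [hnd', if_pos h, List.getElem?_set]
        by_cases hk : k = i
        · subst hk
          have : nd[k]? = some nd[k] := List.getElem?_eq_getElem h
          simp [h, pvMerge, List.getD_eq_getElem?_getD]
        · simp [hk]
          exact fun h' => absurd h'.symm hk
      · have hie : i = nd.length := by omega
        simp only [hnd', if_neg h]
        by_cases hk : k = i
        · have h1 : nd[i]? = none := by simp [hie]
          have h2 : (nd ++ [[c]])[i]? = some [c] := by rw [hie]; simp
          simp [hk, h1, h2, pvMerge]
        · by_cases hk2 : k < nd.length
          · simp [List.getElem?_append_left hk2, hk]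
          · have h1 : nd[k]? = none := by simp; omega
            have h2 : (nd ++ [[c]])[k]? = none := by
              simp [List.length_append]; omega
            simp [hk, h1, h2]
    rw [ih (i + 1) nd' hlen' j, hget' j]
    by_cases hj : j = i
    · subst hj
      simp only [if_pos (le_refl j), if_neg (by omega : ¬ j + 1 ≤ j), Nat.sub_self,
        List.getElem?_cons_zero]
      cases nd[j]? <;> simp [pvMerge]
    · by_cases hji : i ≤ j
      · have hj1 : i + 1 ≤ j := by omega
        have : (c :: cs)[j - i]? = cs[j - (i + 1)]? := by
          have : j - i = (j - (i + 1)) + 1 := by omega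
          simp [this]
        simp [hj, hji, hj1, this]
      · simp [hj, hji, (show ¬ i < j by omega)]

/-- The column at index j as accumulated characters. -/
def pvCol (rs : List (List Char)) (j : Nat) : List Char := rs.filterMap (fun r => r[j]?)

def pvColOpt (rs : List (List Char)) (j : Nat) : Option (List Char) :=
  match pvCol rs j with
  | [] => none
  | l => some l

theorem pvCol_append_single (rs : List (List Char)) (r : List Char) (j : Nat) :
    pvCol (rs ++ [r]) j = pvCol rs j ++ (r[j]?).toList := by
  simp only [pvCol, List.filterMap_append]
  congr 1

theorem pvFold_getElem? (rs : List (List Char)) :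
    ∀ j : Nat, (rs.foldl (fun nd r => pvRowA nd 0 r) ([] : List (List Char)))[j]? = pvColOpt rs j := by
  induction rs using List.reverseRecOn with
  | nil => intro j; simp [pvColOpt, pvCol]
  | append_singleton rs r ih =>
    intro j
    rw [List.foldl_append]
    simp only [List.foldl_cons, List.foldl_nil]
    rw [pvRowA_getElem? r 0 _ (Nat.zero_le _) j, ih j]
    simp only [Nat.zero_le, if_pos, Nat.sub_zero]
    rw [pvColOpt, pvColOpt, pvCol_append_single]
    cases h : pvCol rs j <;> cases hr : r[j]? <;> simp [pvMerge]

theorem pvFoldMax_lt (lens : List Nat) : ∀ (a j : Nat),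
    j < lens.foldl max a ↔ j < a ∨ ∃ l ∈ lens, j < l := by
  induction lens with
  | nil => intro a j; simp
  | cons l lens ih =>
    intro a j
    simp only [List.foldl_cons, ih, List.mem_cons]
    constructor
    · rintro (h | h)
      · rcases Nat.lt_or_ge j a with h2 | h2
        · exact Or.inl h2
        · exact Or.inr ⟨l, Or.inl rfl, by omega⟩
      · rcases h with ⟨x, hx, hj⟩; exact Or.inr ⟨x, Or.inr hx, hj⟩
    · rintro (h | ⟨x, hx | hx, hj⟩)
      · exact Or.inl (by omega)
      · subst hx; exact Or.inl (by omega)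
      · exact Or.inr ⟨x, hx, hj⟩

theorem pvCol_ne_nil_iff (rs : List (List Char)) (j : Nat) :
    pvCol rs j ≠ [] ↔ ∃ r ∈ rs, j < r.length := by
  simp only [pvCol, ne_eq]
  constructor
  · intro h
    by_contra hc
    push Not at hc
    exact h (List.filterMap_eq_nil_iff.mpr
      (fun r hr => List.getElem?_eq_none (by have := hc r hr; omega)))
  · rintro ⟨r, hr, hj⟩ h
    have := List.filterMap_eq_nil_iff.mp h r hr
    simp [List.getElem?_eq_getElem hj] at this

theorem pv_new_digits_eq (rs : List (List Char)) :
    rs.foldl (fun nd r => pvRowA nd 0 r) ([] : List (List Char)) =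
      (List.range ((rs.map List.length).foldl max 0)).map (pvCol rs) := by
  apply List.ext_getElem?
  intro j
  rw [pvFold_getElem? rs j]
  set M := (rs.map List.length).foldl max 0 with hM
  by_cases hj : j < M
  · have hne : pvCol rs j ≠ [] := by
      rw [pvCol_ne_nil_iff]
      have := (pvFoldMax_lt (rs.map List.length) 0 j).mp hj
      rcases this with h | ⟨l, hl, hjl⟩
      · omega
      · rcases List.mem_map.mp hl with ⟨r, hr, rfl⟩
        exact ⟨r, hr, hjl⟩
    rw [List.getElem?_map, List.getElem?_range hj]
    cases h : pvCol rs j with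
    | nil => exact absurd h hne
    | cons x xs => simp [pvColOpt, h]
  · have hnil : pvCol rs j = [] := by
      by_contra h
      rcases (pvCol_ne_nil_iff rs j).mp h with ⟨r, hr, hjr⟩
      exact hj ((pvFoldMax_lt (rs.map List.length) 0 j).mpr
        (Or.inr ⟨r.length, List.mem_map_of_mem hr, hjr⟩))
    rw [List.getElem?_map, List.getElem?_eq_none (by simpa using hj)]
    simp [pvColOpt, hnil]

-- ===== VERDICT (by name: the statement is the Claim_ definition above) =====
theorem digest_problem_top_down_spec : Claim_equal_digest_problem_top_down := by
  intro problem _ _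
  unfold Spec_digest_problem_top_down digest_problem_top_down digest_problem_top_down_alt
  simp only
  set numbers := PySem.List.slice problem none (some (-1)) with hnum
  have hrs : numbers.foldl (fun nd number => pvRowA nd 0 number.toList) ([] : List (List Char)) =
      (numbers.map String.toList).foldl (fun nd r => pvRowA nd 0 r) ([] : List (List Char)) := by
    rw [List.foldl_map]
  rw [hrs, pv_new_digits_eq (numbers.map String.toList)]
  congr 1
  rw [List.map_map]
  have h1 : (numbers.map String.toList).map List.length = numbers.map (fun n => n.toList.length) := by
    simp [List.map_map, Function.comp]
  rw [h1]
  apply List.map_congr_left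
  intro j _
  simp only [Function.comp]
  congr 2
  simp [pvCol, List.filterMap_map, Function.comp]
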